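-- pv_equiv track=rewrite | github.com/my-roki/Algorithm-Coding-Test | 백준/Silver/1972. 놀라운 문자열/놀라운 문자열.py | is_surprising
-- ===== SOURCE A (Python) =====
-- def is_surprising(N):
--     for i in range(1, len(N) - 1):
--         buckets = set()
--         for j in range(len(N) - i):
--             buckets.add(N[j] + N[j + i])
--             if len(buckets) != j + 1:
--                 return False
--     return True
-- ===== SOURCE B (Python) =====
-- def is_surprising(N):
--     n = len(N)
--
--     def gap_ok(i):
--         pairs = sorted(N[j] + N[j + i] for j in range(n - i))
--         return not any(a == b for a, b in zip(pairs, pairs[1:]))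
--
--     return all(gap_ok(i) for i in range(1, n - 1))
-- ===== Notes on version B (the rewrite author's own statement) =====
-- stated objective: alternative
-- what changed: Replaces A's incremental set-insertion with a size check after every insertion (early-exiting mid-gap) by a sort-then-adjacent-scan duplicate test per gap: collect all distance-i pairs, sort them, and report a duplicate iff two adjacent sorted pairs are equal.
import Mathlib
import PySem

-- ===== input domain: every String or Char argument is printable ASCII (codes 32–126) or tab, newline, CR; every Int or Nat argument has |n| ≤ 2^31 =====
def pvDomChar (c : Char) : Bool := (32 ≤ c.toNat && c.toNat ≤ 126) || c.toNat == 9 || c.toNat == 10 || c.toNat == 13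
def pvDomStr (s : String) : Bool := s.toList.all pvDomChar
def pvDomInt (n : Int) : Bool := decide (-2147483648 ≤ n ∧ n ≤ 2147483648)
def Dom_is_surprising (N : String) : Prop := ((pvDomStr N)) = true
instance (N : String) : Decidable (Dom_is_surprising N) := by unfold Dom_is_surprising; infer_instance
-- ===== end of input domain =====

-- B replaces A's incremental add-to-set-and-compare-size loop (early exit mid-gap) by a
-- per-gap sort-then-adjacent-scan duplicate test; alternative algorithm, same results.


-- ===== PORT A =====
-- the two-character string N[j] + N[j+i], as a list of its characters; the indices are
-- always in range at every call site (j < len - i, i ≥ 1), so the pyGetD default is never read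
def pvPair (cs : List Char) (i j : Int) : List Char :=
  [PySem.List.pyGetD cs j ' ', PySem.List.pyGetD cs (j + i) ' ']

-- the inner 'for j in range(len(N) - i)' loop: add the pair, early-return False when the
-- set's size is not j + 1
def pvInnerA (cs : List Char) (i : Int) : List Int → PySem.Set (List Char) → Bool
  | [], _ => true
  | j :: js, buckets =>
      let b := PySem.Set.add buckets (pvPair cs i j)
      if (PySem.Set.len b) ≠ j + 1 then false else pvInnerA cs i js b

-- the outer 'for i in range(1, len(N) - 1)' loop
def pvOuterA (cs : List Char) : List Int → Bool
  | [] => true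
  | i :: is' =>
      if pvInnerA cs i (PySem.List.pyRange 0 ((cs.length : Int) - i) 1) PySem.Set.empty
      then pvOuterA cs is' else false

def is_surprising (N : String) : Bool :=
  pvOuterA N.toList (PySem.List.pyRange 1 ((N.toList.length : Int) - 1) 1)

-- ===== PORT B =====
-- 'not any(a == b for a, b in zip(pairs, pairs[1:]))': no two adjacent elements equal
def pvNoAdjEq (ps : List (List Char)) : Bool :=
  !((ps.zip ps.tail).any (fun p => p.1 == p.2))

-- gap_ok(i): sort all distance-i pairs, then report ok iff no two adjacent sorted pairs are equal
def pvGapOkB (cs : List Char) (i : Int) : Bool :=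
  pvNoAdjEq (PySem.List.sorted
    ((PySem.List.pyRange 0 ((cs.length : Int) - i) 1).map (fun j => pvPair cs i j))
    (fun x => x) false)

def is_surprising_alt (N : String) : Bool :=
  (PySem.List.pyRange 1 ((N.toList.length : Int) - 1) 1).all (fun i => pvGapOkB N.toList i)

-- ===== PRECONDITION & SPEC =====
def Spec_is_surprising (N : String) (out : Bool) : Prop := out = is_surprising_alt N
instance (N : String) (out : Bool) : Decidable (Spec_is_surprising N out) := by unfold Spec_is_surprising; infer_instance

-- ===== CLAIM (what is proved, stated in full; the proofs are below) =====
def Claim_equal_is_surprising : Prop := ∀ (N : String), Dom_is_surprising N → Spec_is_surprising N (is_surprising N)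

-- ===== LEMMAS AND PROOFS =====

-- A's inner loop, started with a duplicate-free bucket set of size k on the index range
-- [k, m), decides Nodup of the bucket set extended by all remaining pairs.
theorem pvInnerA_eq_nodup (cs : List Char) (i : Int) :
    ∀ (d : Nat) (k m : Int) (buckets : PySem.Set (List Char)),
      m - k ≤ (d : Int) → buckets.Nodup → (buckets.length : Int) = k →
      pvInnerA cs i (PySem.List.pyRange k m 1) buckets
        = decide (buckets ++ (PySem.List.pyRange k m 1).map (pvPair cs i)).Nodup := by
  intro d
  induction d with
  | zero =>
      intro k m buckets hd hnd hlen
      rw [PySem.List.pyRange_one_eq_nil (by omega)]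
      simp [pvInnerA, hnd]
  | succ d ih =>
      intro k m buckets hd hnd hlen
      by_cases hkm : k < m
      · rw [PySem.List.pyRange_one_cons hkm]
        simp only [pvInnerA, List.map_cons]
        by_cases hmem : pvPair cs i k ∈ buckets
        · rw [PySem.Set.add_of_mem hmem]
          have hne : (PySem.Set.len buckets) ≠ k + 1 := by
            simp only [PySem.Set.len, ne_eq]; omega
          rw [if_pos hne]
          have hnod : ¬ (buckets ++ pvPair cs i k :: (PySem.List.pyRange (k+1) m 1).map (pvPair cs i)).Nodup :=
            fun h => (List.nodup_append.mp h).2.2 _ hmem _ List.mem_cons_self rfl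
          simp [hnod]
        · rw [PySem.Set.add_of_not_mem hmem]
          have heq : ¬ ((PySem.Set.len (buckets ++ [pvPair cs i k])) ≠ k + 1) := by
            simp [PySem.Set.len, hlen]
          rw [if_neg heq]
          rw [ih (k+1) m (buckets ++ [pvPair cs i k]) (by omega)
              (by
                simp [List.nodup_append, hnd]
                exact fun a ha h => hmem (h ▸ ha))
              (by simp [hlen])]
          congr 1
          simp
      · rw [PySem.List.pyRange_one_eq_nil (by omega)]
        simp [pvInnerA, hnd]

-- adjacent-equality scan on a ≤-sorted list decides Nodup
theorem pvNoAdjEq_eq_nodup :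
    ∀ (s : List (List Char)), s.Pairwise (· ≤ ·) → pvNoAdjEq s = decide s.Nodup := by
  intro s
  induction s with
  | nil => intro _; simp [pvNoAdjEq]
  | cons a t ih =>
      intro hp
      cases t with
      | nil => simp [pvNoAdjEq]
      | cons b u =>
          have hih := ih hp.tail
          by_cases heq : a = b
          · subst heq
            simp [pvNoAdjEq]
          · have hab : a ≤ b := (List.pairwise_cons.mp hp).1 b List.mem_cons_self
            have hnotmem : a ∉ b :: u := by
              intro hmem
              rcases List.mem_cons.mp hmem with h | h
              · exact heq h
              · have hb : b ≤ a := (List.pairwise_cons.mp hp.tail).1 a h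
                exact heq (le_antisymm hab hb)
            simp only [pvNoAdjEq, List.zip_cons_cons, List.tail_cons, List.any_cons,
              Bool.not_or] at hih ⊢
            simp [heq, hnotmem, List.nodup_cons, hih]

-- the sorted permutation preserves Nodup, so the adjacent scan of sorted(l) decides Nodup of l
theorem pvNoAdjEq_sorted (l : List (List Char)) :
    pvNoAdjEq (PySem.List.sorted l (fun x => x) false) = decide l.Nodup := by
  -- align the (definitionally equal) order instances inside 'sorted'
  have hs : PySem.List.sorted l (fun x => x) false
      = @PySem.List.sorted (List Char) (List Char) List.instLinearOrder.toLT
          LinearOrder.toDecidableLT l (fun x => x) false := by congr 1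
  have hpw' := PySem.List.sorted_pairwise l (fun x => x)
  rw [← hs] at hpw'
  exact (pvNoAdjEq_eq_nodup _ hpw').trans
    (by simp [(PySem.List.sorted_perm l (fun x => x) false).nodup_iff])

theorem pvGapOkB_eq_nodup (cs : List Char) (i : Int) :
    pvGapOkB cs i
      = decide ((PySem.List.pyRange 0 ((cs.length : Int) - i) 1).map (fun j => pvPair cs i j)).Nodup := by
  unfold pvGapOkB
  rw [pvNoAdjEq_sorted]

-- A's outer loop is an 'all' over the gap list
theorem pvOuterA_eq_all (cs : List Char) :
    ∀ (is' : List Int),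
      pvOuterA cs is'
        = is'.all (fun i => pvInnerA cs i (PySem.List.pyRange 0 ((cs.length : Int) - i) 1) PySem.Set.empty) := by
  intro is'
  induction is' with
  | nil => rfl
  | cons i rest ih =>
      simp only [pvOuterA, List.all_cons, ih]
      cases pvInnerA cs i (PySem.List.pyRange 0 ((cs.length : Int) - i) 1) PySem.Set.empty <;> simp

-- ===== VERDICT (by name: the statement is the Claim_ definition above) =====
theorem is_surprising_spec : Claim_equal_is_surprising := by
  intro N _
  unfold Spec_is_surprising is_surprising is_surprising_alt
  rw [pvOuterA_eq_all]
  refine (congrArg (List.all _) (funext fun i => ?_)).symm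
  rw [pvGapOkB_eq_nodup]
  rw [pvInnerA_eq_nodup N.toList i ((N.toList.length : Int) - i).toNat 0
      ((N.toList.length : Int) - i) PySem.Set.empty (by omega) List.nodup_nil rfl]
  simp [PySem.Set.empty]
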